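-- pv_equiv track=rewrite | github.com/posl/comment_recommendation | script/split_gen/3_time/zh/210_C/3.py | max_color_num
-- ===== SOURCE A (Python) =====
-- def max_color_num(a, k):
--     """
--     :param a: list
--     :param k: int
--     :return: int
--     """
--     if len(a) <= k:
--         return len(set(a))
--     else:
--         max_color = 0
--         for i in range(len(a) - k + 1):
--             max_color = max(max_color, len(set(a[i:i+k])))
--         return max_color
-- ===== SOURCE B (Python) =====
-- def max_color_num(a, k):
--     """
--     :param a: list
--     :param k: int
--     :return: int
--     """
--     if k >= len(a):
--         return len(set(a))
--     counts = {}
--     distinct = 0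
--     best = 0
--     for i, x in enumerate(a):
--         counts[x] = counts.get(x, 0) + 1
--         if counts[x] == 1:
--             distinct += 1
--         if i >= k:
--             y = a[i - k]
--             counts[y] -= 1
--             if counts[y] == 0:
--                 distinct -= 1
--         if i >= k - 1:
--             best = max(best, distinct)
--     return best
-- ===== Notes on version B (the rewrite author's own statement) =====
-- stated objective: faster
-- what changed: Replaced the per-start O(k) set construction over every window with a single sliding-window pass that maintains a count dict and an incremental distinct counter.
-- outside the precondition, e.g. on max_color_num([1, 2], -1): A returns 1, B raises KeyError
import Mathlib
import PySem

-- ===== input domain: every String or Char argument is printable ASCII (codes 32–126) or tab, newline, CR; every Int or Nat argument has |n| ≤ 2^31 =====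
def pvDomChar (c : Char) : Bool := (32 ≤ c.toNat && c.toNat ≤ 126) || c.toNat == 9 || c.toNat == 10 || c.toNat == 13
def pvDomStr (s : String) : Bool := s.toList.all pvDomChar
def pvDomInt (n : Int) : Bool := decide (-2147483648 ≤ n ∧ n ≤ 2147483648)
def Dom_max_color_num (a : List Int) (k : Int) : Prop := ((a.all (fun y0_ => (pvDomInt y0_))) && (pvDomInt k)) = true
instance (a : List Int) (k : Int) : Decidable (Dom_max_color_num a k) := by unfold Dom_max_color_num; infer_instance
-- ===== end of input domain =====

-- B replaces A's per-window set construction by a single sliding-window pass with a count dict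
-- and an incremental distinct counter (objective: faster, asymptotic).


-- ===== PORT A =====
def max_color_num (a : List Int) (k : Int) : Int :=
  if (a.length : Int) ≤ k then ((PySem.Set.ofList a).length : Int)
  else
    (PySem.List.pyRange 0 ((a.length : Int) - k + 1) 1).foldl
      (fun mc i =>
        max mc ((PySem.Set.ofList (PySem.List.slice a (some i) (some (i + k)))).length : Int)) 0

-- ===== PORT B =====
-- one iteration of Source B's `for i, x in enumerate(a)` body; state = (counts, distinct, best)
def mcnStep (a : List Int) (k : Int)
    (st : PySem.Dict Int Int × Int × Int) (p : Int × Int) :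
    PySem.Dict Int Int × Int × Int :=
  let i := p.1
  let x := p.2
  let counts1 := st.1.insert x (st.1.getD x 0 + 1)
  let distinct1 := if counts1.getD x 0 == 1 then st.2.1 + 1 else st.2.1
  let st2 :=
    if i ≥ k then
      let y := PySem.List.pyGetD a (i - k) 0
      let counts2 := counts1.insert y (counts1.getD y 0 - 1)
      let distinct2 := if counts2.getD y 0 == 0 then distinct1 - 1 else distinct1
      (counts2, distinct2)
    else (counts1, distinct1)
  let best1 := if i ≥ k - 1 then max st.2.2 st2.2 else st.2.2
  (st2.1, st2.2, best1)

def max_color_num_alt (a : List Int) (k : Int) : Int :=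
  if k ≥ (a.length : Int) then ((PySem.Set.ofList a).length : Int)
  else ((PySem.List.enumerate a 0).foldl (mcnStep a k) (PySem.Dict.empty, 0, 0)).2.2

-- ===== PRECONDITION & SPEC =====
-- Pre_ restricts to the natural domain of window sizes, 0 ≤ k: for negative k (outside the
-- task's natural domain) A returns values driven by Python's negative-slice clamping while B's
-- sliding window raises (KeyError/IndexError on the look-back index a[i-k]).
def Pre_max_color_num (a : List Int) (k : Int) : Prop := 0 ≤ k
instance (a : List Int) (k : Int) : Decidable (Pre_max_color_num a k) := by unfold Pre_max_color_num; infer_instance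
def pvWitness_max_color_num : List Int × Int := ([1, 2, 1], 2)

def Spec_max_color_num (a : List Int) (k : Int) (out : Int) : Prop := out = max_color_num_alt a k
instance (a : List Int) (k : Int) (out : Int) : Decidable (Spec_max_color_num a k out) := by unfold Spec_max_color_num; infer_instance

-- ===== CLAIM (what is proved, stated in full; the proofs are below) =====
def Claim_equal_max_color_num : Prop := ∀ (a : List Int) (k : Int), Dom_max_color_num a k → Pre_max_color_num a k → Spec_max_color_num a k (max_color_num a k)

-- ===== LEMMAS AND PROOFS =====

-- the window of the last min(kn, m) elements of the m-element prefix of a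
def mcnWin (a : List Int) (kn m : Nat) : List Int := (a.take m).drop (m - kn)
-- number of distinct elements (= len(set(w)))
def mcnDD (w : List Int) : Int := ((PySem.Set.ofList w).length : Int)
-- distinct count of A's window starting at i
def mcnG (a : List Int) (k : Int) (i : Int) : Int :=
  ((PySem.Set.ofList (PySem.List.slice a (some i) (some (i + k)))).length : Int)
-- A's running maximum over the window starts scanned so far
def mcnF (a : List Int) (k : Int) (m : Nat) : Int :=
  (PySem.List.pyRange 0 ((m : Int) - k + 1) 1).foldl (fun mc i => max mc (mcnG a k i)) 0
-- loop invariant of B after the first m elements were processed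
def mcnInv (a : List Int) (k : Int) (kn m : Nat)
    (st : PySem.Dict Int Int × Int × Int) : Prop :=
  (∀ z, st.1.getD z 0 = ((mcnWin a kn m).count z : Int)) ∧
  st.2.1 = mcnDD (mcnWin a kn m) ∧ st.2.2 = mcnF a k m

lemma mcnDD_append (w : List Int) (y : Int) :
    mcnDD (w ++ [y]) = mcnDD w + (if y ∈ w then 0 else 1) := by
  unfold mcnDD
  rw [PySem.Set.ofList_append_singleton]
  by_cases hy : y ∈ w
  · rw [PySem.Set.add_of_mem ((PySem.Set.mem_ofList w y).mpr hy), if_pos hy, add_zero]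
  · rw [PySem.Set.add_of_not_mem (fun hc => hy ((PySem.Set.mem_ofList w y).mp hc)), if_neg hy]
    simp

lemma mcnDD_cons (y : Int) (w : List Int) :
    mcnDD (y :: w) = mcnDD w + (if y ∈ w then 0 else 1) := by
  have hperm : (PySem.Set.ofList (y :: w)).Perm (PySem.Set.ofList (w ++ [y])) :=
    (List.perm_ext_iff_of_nodup (PySem.Set.nodup_ofList _) (PySem.Set.nodup_ofList _)).mpr
      (by intro z; simp [PySem.Set.mem_ofList, or_comm])
  have h2 := mcnDD_append w y
  unfold mcnDD at h2 ⊢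
  rw [hperm.length_eq]
  exact h2

-- the removal step of B: decrementing the count of the departing front element y
lemma mcnD2 (c : PySem.Dict Int Int) (d : Int) (y : Int) (w2 : List Int)
    (hcy : c.getD y 0 = (w2.count y : Int)) (hdv : d = mcnDD (y :: w2)) :
    (if c.getD y 0 == 0 then d - 1 else d) = mcnDD w2 := by
  rw [hcy, hdv, mcnDD_cons]
  by_cases hmem : y ∈ w2
  · have h1 : w2.count y ≠ 0 := fun hh => (List.count_eq_zero.mp hh) hmem
    have h2 : (((w2.count y : Nat) : Int) == 0) = false := by
      rw [beq_eq_false_iff_ne]; omega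
    rw [h2]; simp [hmem]
  · rw [List.count_eq_zero.mpr hmem]
    simp [hmem]

lemma mcnF_succ_of_ge (a : List Int) (k : Int) (m : Nat) (h : 0 ≤ (m : Int) - k + 1) :
    mcnF a k (m + 1) = max (mcnF a k m) (mcnG a k ((m : Int) - k + 1)) := by
  unfold mcnF
  rw [show (((m + 1 : Nat) : Int)) - k + 1 = ((m : Int) - k + 1) + 1 from by omega]
  rw [PySem.List.pyRange_one_succ_right (by omega), List.foldl_append]
  rfl

lemma mcnF_succ_of_lt (a : List Int) (k : Int) (m : Nat) (h : (m : Int) - k + 1 < 0) :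
    mcnF a k (m + 1) = mcnF a k m := by
  unfold mcnF
  rw [PySem.List.pyRange_one_eq_nil (by omega),
    PySem.List.pyRange_one_eq_nil (by omega)]

lemma mcnG_eq_dd (a : List Int) (k : Int) (kn m : Nat) (hk : (kn : Int) = k)
    (h1 : kn ≤ m + 1) :
    mcnG a k ((m : Int) - k + 1) = mcnDD (mcnWin a kn (m + 1)) := by
  unfold mcnG mcnDD mcnWin
  rw [show (m : Int) - k + 1 = ((m + 1 - kn : Nat) : Int) from by omega, ← hk,
    PySem.List.slice_natCast_add, List.drop_take,
    show m + 1 - (m + 1 - kn) = kn from by omega]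

lemma mcnStep_inv (a : List Int) (k : Int) (kn m : Nat) (hk : (kn : Int) = k)
    (hm : m < a.length) (st : PySem.Dict Int Int × Int × Int)
    (h : mcnInv a k kn m st) :
    mcnInv a k kn (m + 1) (mcnStep a k st ((m : Int), a[m])) := by
  obtain ⟨hc, hd, hb⟩ := h
  have htake : a.take (m + 1) = a.take m ++ [a[m]] := by
    rw [List.take_add_one]; simp [List.getElem?_eq_getElem hm]
  have hW' : (a.take (m + 1)).drop (m - kn) = mcnWin a kn m ++ [a[m]] := by
    rw [htake, List.drop_append_of_le_length (by rw [List.length_take]; omega)]; rfl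
  have hc1 : ∀ z, (st.1.insert a[m] (st.1.getD a[m] 0 + 1)).getD z 0
      = (((mcnWin a kn m ++ [a[m]]).count z : Nat) : Int) := by
    intro z
    rw [PySem.Dict.getD_insert, List.count_append]
    by_cases hz : z = a[m]
    · subst hz; rw [if_pos rfl, hc]
      simp
    · rw [if_neg hz, hc z,
        show List.count z [a[m]] = 0 from List.count_eq_zero.mpr (by simpa using hz),
        Nat.add_zero]
  have hdd1 : (if (st.1.insert a[m] (st.1.getD a[m] 0 + 1)).getD a[m] 0 == 1
        then st.2.1 + 1 else st.2.1) = mcnDD (mcnWin a kn m ++ [a[m]]) := by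
    rw [PySem.Dict.getD_insert_self, hc, hd, mcnDD_append]
    by_cases hmem : a[m] ∈ mcnWin a kn m
    · have h1 : (mcnWin a kn m).count a[m] ≠ 0 := fun hh => (List.count_eq_zero.mp hh) hmem
      have h2 : ((((mcnWin a kn m).count a[m] : Nat) : Int) + 1 == 1) = false := by
        rw [beq_eq_false_iff_ne]; omega
      rw [h2]; simp [hmem]
    · rw [List.count_eq_zero.mpr hmem]
      simp [hmem]
  by_cases hge : kn ≤ m
  · -- the front element a[m - kn] leaves the window
    have hidx : m - kn < a.length := by omega
    have hy : PySem.List.pyGetD a ((m : Int) - k) 0 = a[m - kn] := by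
      rw [show (m : Int) - k = ((m - kn : Nat) : Int) from by omega,
        PySem.List.pyGetD_natCast, List.getD_eq_getElem a 0 hidx]
    have hcons : mcnWin a kn m ++ [a[m]] = a[m - kn] :: mcnWin a kn (m + 1) := by
      rw [← hW', List.drop_eq_getElem_cons (by rw [List.length_take]; omega)]
      congr 1
      · exact List.getElem_take
      · unfold mcnWin
        rw [show m - kn + 1 = m + 1 - kn from by omega]
    have hcond : ((m : Int) ≥ k) := by omega
    have hcond' : ((m : Int) ≥ k - 1) := by omega
    unfold mcnInv mcnStep
    simp only [if_pos hcond, if_pos hcond', hy]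
    set c1 := st.1.insert a[m] (st.1.getD a[m] 0 + 1) with hc1e
    set d1 := (if c1.getD a[m] 0 == 1 then st.2.1 + 1 else st.2.1) with hd1e
    set c2 := c1.insert (a[m - kn]) (c1.getD (a[m - kn]) 0 - 1) with hc2e
    have hcy : c2.getD (a[m - kn]) 0 = (((mcnWin a kn (m + 1)).count (a[m - kn]) : Nat) : Int) := by
      rw [hc2e, PySem.Dict.getD_insert_self, hc1, hcons, List.count_cons_self]
      push_cast; ring
    have hD2 : (if c2.getD (a[m - kn]) 0 == 0 then d1 - 1 else d1)
        = mcnDD (mcnWin a kn (m + 1)) :=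
      mcnD2 c2 d1 (a[m - kn]) (mcnWin a kn (m + 1)) hcy
        (hdd1.trans (congrArg mcnDD hcons))
    refine ⟨?_, ?_, ?_⟩
    · intro z
      rw [hc2e, PySem.Dict.getD_insert]
      by_cases hz : z = a[m - kn]
      · subst hz
        rw [if_pos rfl, hc1, hcons, List.count_cons_self]
        push_cast; ring
      · rw [if_neg hz, hc1, hcons, List.count_cons_of_ne (Ne.symm hz)]
    · exact hD2
    · rw [hD2, hb, mcnF_succ_of_ge a k m (by omega), mcnG_eq_dd a k kn m hk (by omega)]
  · -- window still growing: nothing leaves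
    have hw2 : mcnWin a kn (m + 1) = mcnWin a kn m ++ [a[m]] := by
      unfold mcnWin
      rw [show m + 1 - kn = m - kn from by omega]
      exact hW'
    have hcond : ¬ ((m : Int) ≥ k) := by omega
    unfold mcnInv mcnStep
    simp only [if_neg hcond]
    by_cases hb1 : ((m : Int) ≥ k - 1)
    · simp only [if_pos hb1]
      refine ⟨?_, ?_, ?_⟩
      · intro z; rw [hw2]; exact hc1 z
      · rw [hw2]; exact hdd1
      · rw [hdd1, ← hw2, hb, mcnF_succ_of_ge a k m (by omega),
          mcnG_eq_dd a k kn m hk (by omega)]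
    · simp only [if_neg hb1]
      refine ⟨?_, ?_, ?_⟩
      · intro z; rw [hw2]; exact hc1 z
      · rw [hw2]; exact hdd1
      · rw [hb, mcnF_succ_of_lt a k m (by omega)]

lemma mcnLoop (a : List Int) (k : Int) (kn : Nat) (hk : (kn : Int) = k) :
    ∀ (r : List Int) (m : Nat) (st), a.drop m = r → m ≤ a.length → mcnInv a k kn m st →
      mcnInv a k kn a.length ((PySem.List.enumerate r (m : Int)).foldl (mcnStep a k) st) := by
  intro r
  induction r with
  | nil =>
    intro m st hdrop hle hinv
    have hm : m = a.length := le_antisymm hle (List.drop_eq_nil_iff.mp hdrop)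
    rw [PySem.List.enumerate_nil, List.foldl_nil]
    exact hm ▸ hinv
  | cons x r' ih =>
    intro m st hdrop hle hinv
    have hm : m < a.length := by
      by_contra hcon
      rw [List.drop_eq_nil_of_le (by omega)] at hdrop
      simp at hdrop
    have h0 : a[m]? = some x := by
      have h1 : (a.drop m)[0]? = some x := by rw [hdrop]; rfl
      rwa [List.getElem?_drop, Nat.add_zero] at h1
    have hx : a[m] = x := by
      rw [List.getElem?_eq_getElem hm] at h0
      exact Option.some.inj h0
    have hdrop' : a.drop (m + 1) = r' := by
      have h2 := congrArg (List.drop 1) hdrop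
      rw [List.drop_drop] at h2
      simpa using h2
    rw [PySem.List.enumerate_cons, List.foldl_cons]
    have hstep := mcnStep_inv a k kn m hk hm st hinv
    rw [hx] at hstep
    have hfin := ih (m + 1) (mcnStep a k st ((m : Int), x)) hdrop' (by omega) hstep
    rw [show ((m : Int) + 1) = ((m + 1 : Nat) : Int) from by push_cast; ring]
    exact hfin

lemma mcnInv_init (a : List Int) (k : Int) (kn : Nat) (hk : (kn : Int) = k) (h0 : 0 ≤ k) :
    mcnInv a k kn 0 (PySem.Dict.empty, 0, 0) := by
  refine ⟨?_, ?_, ?_⟩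
  · intro z; simp [mcnWin, PySem.Dict.getD_empty]
  · simp [mcnWin, mcnDD]
  · show (0 : Int) = mcnF a k 0
    rcases (by omega : k = 0 ∨ 1 ≤ k) with h1 | h1
    · subst h1
      unfold mcnF
      rw [show (((0 : Nat) : Int)) - 0 + 1 = 0 + 1 from by norm_num,
        PySem.List.pyRange_one_singleton]
      simp only [List.foldl_cons, List.foldl_nil]
      have hsl : PySem.List.slice a (some (0 : Int)) (some ((0 : Int) + 0)) = [] := by
        rw [show ((0 : Int) + 0) = (0 : Int) from by ring,
          PySem.List.slice_toNat a (by norm_num) (by norm_num)]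
        simp
      unfold mcnG
      rw [hsl]
      simp
    · unfold mcnF
      rw [PySem.List.pyRange_one_eq_nil (by omega)]
      rfl

-- ===== VERDICT (by name: the statement is the Claim_ definition above) =====
theorem max_color_num_spec : Claim_equal_max_color_num := by
  intro a k _ hpre
  unfold Spec_max_color_num max_color_num max_color_num_alt
  by_cases hbig : (a.length : Int) ≤ k
  · simp [ge_iff_le, hbig]
  · simp only [ge_iff_le, hbig, if_false]
    have hk : ((k.toNat : Int)) = k := Int.toNat_of_nonneg hpre
    have h := mcnLoop a k k.toNat hk a 0 (PySem.Dict.empty, 0, 0) (by simp) (by simp)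
      (mcnInv_init a k k.toNat hk hpre)
    have hfin := h.2.2
    simp only [Nat.cast_zero] at hfin
    rw [hfin]
    rfl
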